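-- pv_equiv track=rewrite | github.com/alldayfba/nomad-nebula | execution/velocity_analyzer.py | _bsr_to_monthly_sales
-- ===== SOURCE A (Python) =====
-- def _bsr_to_monthly_sales(bsr: int) -> int:
--     """Quick BSR to monthly sales estimate. Matches calculate_fba_profitability.py."""
--     tiers = [
--         (50, 5000), (100, 3000), (500, 1500), (1000, 800),
--         (5000, 300), (10000, 150), (25000, 80), (50000, 40),
--         (100000, 20), (200000, 10), (500000, 5), (1000000, 2),
--     ]
--     for max_rank, sales in tiers:
--         if bsr <= max_rank:
--             return sales
--     return 1
-- ===== SOURCE B (Python) =====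
-- def _bsr_to_monthly_sales(bsr: int) -> int:
--     """Quick BSR to monthly sales estimate. Matches calculate_fba_profitability.py."""
--     thresholds = [50, 100, 500, 1000, 5000, 10000, 25000, 50000, 100000, 200000, 500000, 1000000]
--     sales = [5000, 3000, 1500, 800, 300, 150, 80, 40, 20, 10, 5, 2]
--     lo, hi = 0, len(thresholds)
--     while lo < hi:
--         mid = (lo + hi) // 2
--         if thresholds[mid] < bsr:
--             lo = mid + 1
--         else:
--             hi = mid
--     return sales[lo] if lo < len(sales) else 1
-- ===== Notes on version B (the rewrite author's own statement) =====
-- stated objective: alternative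
-- what changed: Replaces the linear first-match scan over (threshold, sales) pairs with a binary search (bisect_left by hand) over a sorted thresholds list and a parallel sales list.
import Mathlib
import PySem

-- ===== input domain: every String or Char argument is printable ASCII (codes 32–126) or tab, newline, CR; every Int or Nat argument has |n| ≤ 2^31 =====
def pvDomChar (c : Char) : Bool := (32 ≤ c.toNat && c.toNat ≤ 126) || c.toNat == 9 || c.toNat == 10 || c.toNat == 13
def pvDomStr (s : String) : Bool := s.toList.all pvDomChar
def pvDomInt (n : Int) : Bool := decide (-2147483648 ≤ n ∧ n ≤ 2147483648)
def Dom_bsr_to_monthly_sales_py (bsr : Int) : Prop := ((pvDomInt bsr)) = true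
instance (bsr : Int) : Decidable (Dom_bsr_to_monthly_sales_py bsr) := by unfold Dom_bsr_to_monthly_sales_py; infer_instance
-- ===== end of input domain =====

-- B replaces A's linear first-match scan over tiers with a hand-written bisect_left
-- binary search over a sorted thresholds list plus a parallel sales list (alternative structure; same result).

-- ===== PORT A =====
-- the 'for max_rank, sales in tiers: if bsr <= max_rank: return sales' loop
def pvScanTiers (bsr : Int) : List (Int × Int) → Int
  | [] => 1
  | (max_rank, sales) :: rest => if bsr ≤ max_rank then sales else pvScanTiers bsr rest

def bsr_to_monthly_sales_py (bsr : Int) : Int :=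
  pvScanTiers bsr
    [(50, 5000), (100, 3000), (500, 1500), (1000, 800),
     (5000, 300), (10000, 150), (25000, 80), (50000, 40),
     (100000, 20), (200000, 10), (500000, 5), (1000000, 2)]

-- ===== PORT B =====
def pvThresholds : List Int := [50, 100, 500, 1000, 5000, 10000, 25000, 50000, 100000, 200000, 500000, 1000000]
def pvSales : List Int := [5000, 3000, 1500, 800, 300, 150, 80, 40, 20, 10, 5, 2]

-- the 'while lo < hi' binary search loop (terminates because hi - lo shrinks)
def pvBisect (bsr : Int) (lo hi : Nat) : Nat :=
  if lo < hi then
    let mid := (lo + hi) / 2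
    if pvThresholds.getD mid 0 < bsr then pvBisect bsr (mid + 1) hi
    else pvBisect bsr lo mid
  else lo
termination_by hi - lo
decreasing_by all_goals omega

def bsr_to_monthly_sales_py_alt (bsr : Int) : Int :=
  let lo := pvBisect bsr 0 pvThresholds.length
  if lo < pvSales.length then pvSales.getD lo 1 else 1

-- ===== PRECONDITION & SPEC =====
def Spec_bsr_to_monthly_sales_py (bsr : Int) (out : Int) : Prop := out = bsr_to_monthly_sales_py_alt bsr
instance (bsr : Int) (out : Int) : Decidable (Spec_bsr_to_monthly_sales_py bsr out) := by unfold Spec_bsr_to_monthly_sales_py; infer_instance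

-- ===== CLAIM (what is proved, stated in full; the proofs are below) =====
def Claim_equal_bsr_to_monthly_sales_py : Prop := ∀ (bsr : Int), Dom_bsr_to_monthly_sales_py bsr → Spec_bsr_to_monthly_sales_py bsr (bsr_to_monthly_sales_py bsr)

-- ===== LEMMAS AND PROOFS =====

-- ===== VERDICT (by name: the statement is the Claim_ definition above) =====
set_option maxHeartbeats 1600000 in
theorem bsr_to_monthly_sales_py_spec : Claim_equal_bsr_to_monthly_sales_py := by
  intro bsr _
  unfold Spec_bsr_to_monthly_sales_py bsr_to_monthly_sales_py bsr_to_monthly_sales_py_alt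
  simp [pvScanTiers, pvBisect, pvThresholds, pvSales, List.getD]
  split_ifs <;> simp <;> omega
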